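-- pv_equiv track=rewrite | github.com/jhhr/jp_text_processing | kana/get_ordered_sublists.py | get_ordered_sublists
-- ===== SOURCE A (Python) =====
-- from itertools import combinations
-- from typing import Sequence, TypeVar
--
-- T = TypeVar("T", bound=Sequence)
--
-- def get_ordered_sublists(list_to_split: T, split_count: int) -> list[list[T]]:
--     """
--     Splits a sequence into all possible combinations of N subsequences while preserving order.
--
--     Args:
--         list_to_split: The sequence to split (list, string, tuple, etc.)
--         split_count: Number of subsequences to create (N)
--
--     Returns:
--         A list of all possible ways to split the input into N subsequences.
--         Each way is represented as a list of N subsequences.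
--
--     Example:
--         >>> get_ordered_sublists([1, 2, 3], 2)
--         [[[1], [2, 3]], [[1, 2], [3]]]
--         >>> get_ordered_sublists("abc", 2)
--         [['a', 'bc'], ['ab', 'c']]
--     """
--     n = len(list_to_split)
--
--     # Return nothing for invalid split counts
--     if split_count <= 0 or split_count > n:
--         return []
--
--     if split_count == 1:
--         return [[list_to_split]]
--
--     if split_count == n:
--         return [[list_to_split[i : i + 1] for i in range(n)]]
--
--     results = []
--
--     # Choose positions where to split (between elements)
--     for split_positions in combinations(range(1, n), split_count - 1):
--         # Convert split positions to actual subsequences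
--         sublists = []
--         prev = 0
--
--         for pos in split_positions:
--             sublists.append(list_to_split[prev:pos])
--             prev = pos
--
--         # Add the last subsequence
--         sublists.append(list_to_split[prev:])
--
--         results.append(sublists)
--
--     return results
-- ===== SOURCE B (Python) =====
-- def get_ordered_sublists(list_to_split, split_count):
--     def split(seq, k):
--         if k <= 0 or k > len(seq):
--             return []
--         if k == 1:
--             return [[seq]]
--         out = []
--         for first_len in range(1, len(seq) - k + 2):
--             prefix = seq[:first_len]
--             for rest in split(seq[first_len:], k - 1):
--                 out.append([prefix] + rest)
--         return out
--     return split(list_to_split, split_count)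
-- ===== Notes on version B (the rewrite author's own statement) =====
-- stated objective: alternative
-- what changed: Replaced the itertools.combinations enumeration of cut positions (with special-cased k==1 and k==n branches) by a direct recursion on (suffix, remaining part count) that chooses the first part's length and prepends the prefix to each recursive split, yielding the same lexicographic order.
import Mathlib
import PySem

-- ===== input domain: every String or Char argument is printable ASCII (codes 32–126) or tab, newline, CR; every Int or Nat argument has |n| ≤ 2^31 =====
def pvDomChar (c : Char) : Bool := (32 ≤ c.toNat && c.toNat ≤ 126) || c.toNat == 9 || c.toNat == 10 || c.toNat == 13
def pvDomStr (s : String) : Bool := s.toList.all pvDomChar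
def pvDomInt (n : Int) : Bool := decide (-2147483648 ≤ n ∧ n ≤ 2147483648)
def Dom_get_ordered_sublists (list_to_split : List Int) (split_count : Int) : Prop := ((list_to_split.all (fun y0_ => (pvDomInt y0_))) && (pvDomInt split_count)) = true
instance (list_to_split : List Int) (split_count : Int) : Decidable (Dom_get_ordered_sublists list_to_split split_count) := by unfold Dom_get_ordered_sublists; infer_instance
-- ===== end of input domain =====

-- B re-implements A's combinations-of-cut-positions enumeration as a recursion on
-- (suffix, remaining part count); same return value, proved equal on all inputs.

-- ===== PORT A =====
-- itertools.combinations(l, k): k-combinations of l in lexicographic order of positions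
def pvCombos (k : Nat) (l : List Int) : List (List Int) :=
  match k, l with
  | 0, _ => [[]]
  | _ + 1, [] => []
  | k + 1, x :: xs => (pvCombos k xs).map (x :: ·) ++ pvCombos (k + 1) xs

def get_ordered_sublists (list_to_split : List Int) (split_count : Int) : List (List (List Int)) :=
  let n : Int := list_to_split.length
  if split_count ≤ 0 ∨ split_count > n then []
  else if split_count = 1 then [[list_to_split]]
  else if split_count = n then
    [(PySem.List.pyRange 0 n 1).map
      (fun i => PySem.List.slice list_to_split (some i) (some (i + 1)))]
  else
    (pvCombos (split_count - 1).toNat (PySem.List.pyRange 1 n 1)).foldl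
      (fun results split_positions =>
        let st := split_positions.foldl
          (fun (st : List (List Int) × Int) pos =>
            (st.1 ++ [PySem.List.slice list_to_split (some st.2) (some pos)], pos))
          ([], 0)
        results ++ [st.1 ++ [PySem.List.slice list_to_split (some st.2) none]])
      []

-- ===== PORT B =====
def pvSplit (seq : List Int) (k : Int) : List (List (List Int)) :=
  if _h1 : k ≤ 0 ∨ (seq.length : Int) < k then []
  else if _h2 : k = 1 then [[seq]]
  else
    (PySem.List.pyRange 1 ((seq.length : Int) - k + 2) 1).foldl
      (fun out first_len =>
        out ++ (pvSplit (PySem.List.slice seq (some first_len) none) (k - 1)).map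
          (fun rest => PySem.List.slice seq none (some first_len) :: rest))
      []
termination_by k.toNat
decreasing_by omega

def get_ordered_sublists_alt (list_to_split : List Int) (split_count : Int) : List (List (List Int)) :=
  pvSplit list_to_split split_count

-- ===== PRECONDITION & SPEC =====
def Spec_get_ordered_sublists (list_to_split : List Int) (split_count : Int) (out : List (List (List Int))) : Prop := out = get_ordered_sublists_alt list_to_split split_count
instance (list_to_split : List Int) (split_count : Int) (out : List (List (List Int))) : Decidable (Spec_get_ordered_sublists list_to_split split_count out) := by unfold Spec_get_ordered_sublists; infer_instance

-- ===== CLAIM (what is proved, stated in full; the proofs are below) =====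
def Claim_equal_get_ordered_sublists : Prop := ∀ (list_to_split : List Int) (split_count : Int), Dom_get_ordered_sublists list_to_split split_count → Spec_get_ordered_sublists list_to_split split_count (get_ordered_sublists list_to_split split_count)

-- ===== LEMMAS AND PROOFS =====

-- combinations on Nat (proof-side mirror of pvCombos)
def pvCombosN (k : Nat) (l : List Nat) : List (List Nat) :=
  match k, l with
  | 0, _ => [[]]
  | _ + 1, [] => []
  | k + 1, x :: xs => (pvCombosN k xs).map (x :: ·) ++ pvCombosN (k + 1) xs

-- A's pieces of seq from a list of ascending cut positions, starting at prev
def pvG (seq : List Int) : Nat → List Nat → List (List Int)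
  | prev, [] => [seq.drop prev]
  | prev, pos :: rest => (seq.drop prev).take (pos - prev) :: pvG seq pos rest

theorem pvCombos_map_ofNat (k : Nat) (l : List Nat) :
    pvCombos k (l.map (Int.ofNat)) = (pvCombosN k l).map (List.map Int.ofNat) := by
  induction l generalizing k with
  | nil => cases k <;> simp [pvCombos, pvCombosN]
  | cons x xs ih =>
    cases k with
    | zero => simp [pvCombos, pvCombosN]
    | succ k =>
      simp only [List.map_cons, pvCombos, pvCombosN, ih, List.map_append, List.map_map]
      rfl

theorem pvCombosN_nil_of_short (k : Nat) (l : List Nat) (h : l.length < k) :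
    pvCombosN k l = [] := by
  induction l generalizing k with
  | nil => cases k with
    | zero => omega
    | succ k => rfl
  | cons x xs ih =>
    cases k with
    | zero => omega
    | succ k =>
      simp only [pvCombosN, List.append_eq_nil_iff, List.map_eq_nil_iff]
      exact ⟨ih k (by simpa using h), ih (k+1) (by simp at h ⊢; omega)⟩

theorem pvCombosN_range' (c s k : Nat) :
    pvCombosN (k + 1) (List.range' s c) =
      (List.range c).flatMap
        (fun i => (pvCombosN k (List.range' (s + i + 1) (c - i - 1))).map ((s + i) :: ·)) := by
  induction c generalizing s with
  | zero => simp [pvCombosN]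
  | succ c ih =>
    rw [List.range'_succ]
    simp only [pvCombosN]
    rw [List.range_succ_eq_map, List.flatMap_cons, List.flatMap_map]
    refine congrArg₂ _ (by norm_num) ?_
    rw [ih (s + 1)]
    refine List.flatMap_congr ?_
    intro i _
    have h1 : s + 1 + i = s + Nat.succ i := by omega
    have h2 : c - i - 1 = c + 1 - Nat.succ i - 1 := by omega
    rw [h1, h2]

-- A's inner loop over the cut positions computes pvG
theorem pvG_foldl (seq : List Int) (cuts : List Nat) (acc : List (List Int)) (prev : Nat) :
    (let st := (cuts.map (Int.ofNat)).foldl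
        (fun (st : List (List Int) × Int) pos =>
          (st.1 ++ [PySem.List.slice seq (some st.2) (some pos)], pos)) (acc, (prev : Int))
     st.1 ++ [PySem.List.slice seq (some st.2) none]) = acc ++ pvG seq prev cuts := by
  induction cuts generalizing acc prev with
  | nil => simp [pvG, PySem.List.slice_from_natCast]
  | cons pos rest ih =>
    simp only [List.map_cons, List.foldl_cons]
    rw [show Int.ofNat pos = ((pos : Nat) : Int) from rfl]
    rw [ih (acc ++ [PySem.List.slice seq (some ((prev : Nat) : Int)) (some ((pos : Nat) : Int))]) pos]
    simp [pvG, PySem.List.slice_natCast]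

theorem pvSplit_nil (seq : List Int) (k : Int) (h : k ≤ 0 ∨ (seq.length : Int) < k) :
    pvSplit seq k = [] := by
  rw [pvSplit]
  simp [h]

theorem pvSplit_one (seq : List Int) (h : 1 ≤ seq.length) :
    pvSplit seq 1 = [[seq]] := by
  rw [pvSplit]
  rw [dif_neg (by omega), dif_pos rfl]

theorem pvSplit_succ (seq : List Int) (j : Nat) (h1 : 1 ≤ j) (h2 : j + 1 ≤ seq.length) :
    pvSplit seq ((j + 1 : Nat) : Int) =
      (List.range' 1 (seq.length - j)).flatMap
        (fun a => (pvSplit (seq.drop a) (j : Int)).map ((seq.take a) :: ·)) := by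
  rw [pvSplit]
  rw [dif_neg (by omega), dif_neg (by omega)]
  have hk : ((j + 1 : Nat) : Int) - 1 = (j : Int) := by push_cast; ring
  have hb : (seq.length : Int) - ((j + 1 : Nat) : Int) + 2 = ((seq.length - j : Nat) : Int) + 1 := by
    omega
  rw [hk, hb, PySem.List.pyRange_one]
  have ht : (((seq.length - j : Nat) : Int) + 1 - 1).toNat = seq.length - j := by omega
  rw [ht]
  rw [PySem.List.foldl_append_eq_flatMap
    (fun fl => (pvSplit (PySem.List.slice seq (some fl) none) (j : Int)).map
      (fun rest => PySem.List.slice seq none (some fl) :: rest))]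
  rw [List.flatMap_map, List.range'_eq_map_range, List.flatMap_map]
  rw [List.nil_append]
  refine List.flatMap_congr ?_
  intro t _
  have h1 : (1 : Int) + (t : Int) = ((1 + t : Nat) : Int) := by push_cast; ring
  simp only [h1, PySem.List.slice_from_natCast, PySem.List.slice_to_natCast]

-- main bridge: A's mapped combinations equal B's recursion, at every suffix
theorem pvMain (seq : List Int) (m : Nat) :
    ∀ prev : Nat, prev < seq.length →
      (pvCombosN m (List.range' (prev + 1) (seq.length - 1 - prev))).map (pvG seq prev) =
        pvSplit (seq.drop prev) ((m + 1 : Nat) : Int) := by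
  induction m with
  | zero =>
    intro prev hprev
    have h1 : pvSplit (seq.drop prev) ((0 + 1 : Nat) : Int) = [[seq.drop prev]] := by
      have := pvSplit_one (seq.drop prev) (by simp; omega)
      simpa using this
    rw [h1]
    simp [pvCombosN, pvG]
  | succ m ih =>
    intro prev hprev
    by_cases hbig : seq.length - prev < m + 2
    · rw [pvSplit_nil _ _ (Or.inr (by simp only [List.length_drop]; omega))]
      rw [pvCombosN_nil_of_short _ _ (by rw [List.length_range']; omega)]
      simp
    · have hlen : (seq.drop prev).length = seq.length - prev := by simp
      rw [pvSplit_succ (seq.drop prev) (m + 1) (by omega) (by omega)]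
      rw [hlen]
      rw [pvCombosN_range', List.map_flatMap]
      rw [List.range'_eq_map_range, List.flatMap_map]
      have hsplit : seq.length - 1 - prev = (seq.length - prev - (m + 1)) + m := by omega
      rw [hsplit, List.range_add, List.flatMap_append, List.flatMap_map]
      have hnil : (List.range m).flatMap
          (fun t => (((pvCombosN m
              (List.range' (prev + 1 + (seq.length - prev - (m + 1) + t) + 1)
                (seq.length - prev - (m + 1) + m - (seq.length - prev - (m + 1) + t) - 1))).map
                ((prev + 1 + (seq.length - prev - (m + 1) + t)) :: ·)).map (pvG seq prev))) = [] := by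
        refine List.flatMap_eq_nil_iff.mpr ?_
        intro t ht
        have ht' : t < m := List.mem_range.mp ht
        rw [pvCombosN_nil_of_short _ _ (by rw [List.length_range']; omega)]
        simp
      rw [hnil, List.append_nil]
      refine List.flatMap_congr ?_
      intro i hi
      have hiL : i < seq.length - prev - (m + 1) := List.mem_range.mp hi
      rw [List.map_map]
      have e1 : seq.length - prev - (m + 1) + m - i - 1 = seq.length - 1 - (prev + 1 + i) := by omega
      rw [e1]
      have e2 : (pvG seq prev ∘ ((prev + 1 + i) :: ·)) =
          ((seq.drop prev).take (1 + i) :: ·) ∘ pvG seq (prev + 1 + i) := by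
        funext cuts
        show pvG seq prev ((prev + 1 + i) :: cuts) = _
        simp only [pvG, Function.comp]
        congr 2
        omega
      rw [e2, ← List.map_map, ih (prev + 1 + i) (by omega)]
      rw [List.drop_drop]
      have e3 : prev + (1 + i) = prev + 1 + i := by omega
      rw [e3]

theorem pvSplit_full (seq : List Int) (h : seq ≠ []) :
    pvSplit seq (seq.length : Int) = [seq.map (fun x => [x])] := by
  induction seq with
  | nil => exact absurd rfl h
  | cons x xs ih =>
    by_cases hx : xs = []
    · subst hx
      simpa using pvSplit_one [x] (by simp)
    · have hlen : 1 ≤ xs.length := by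
        cases xs with
        | nil => exact absurd rfl hx
        | cons y ys => simp
      have hcast : ((x :: xs).length : Int) = ((xs.length + 1 : Nat) : Int) := by
        simp
      rw [hcast, pvSplit_succ (x :: xs) xs.length hlen (by simp)]
      have hr : (x :: xs).length - xs.length = 1 := by simp
      rw [hr]
      simp only [List.range'_one, List.flatMap_cons, List.flatMap_nil, List.append_nil]
      rw [show (x :: xs).drop 1 = xs from rfl, ih hx]
      simp

theorem pvSingletons (seq : List Int) :
    (List.range seq.length).map (fun i => (seq.drop i).take 1) = seq.map (fun x => [x]) := by
  induction seq with
  | nil => simp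
  | cons x xs ih =>
    simp only [List.length_cons, List.range_succ_eq_map, List.map_cons, List.map_map]
    refine congrArg₂ _ rfl ?_
    rw [← ih]
    exact List.map_congr_left (fun i _ => rfl)

-- ===== VERDICT (by name: the statement is the Claim_ definition above) =====
theorem get_ordered_sublists_spec : Claim_equal_get_ordered_sublists := by
  intro seq k _
  show get_ordered_sublists seq k = pvSplit seq k
  unfold get_ordered_sublists
  by_cases h0 : k ≤ 0 ∨ k > (seq.length : Int)
  · rw [if_pos h0, pvSplit_nil seq k h0]
  · rw [if_neg h0]
    have hk0 : 0 < k := by omega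
    have hkn : k ≤ (seq.length : Int) := by omega
    by_cases h1 : k = 1
    · rw [if_pos h1, h1, pvSplit_one seq (by omega)]
    · rw [if_neg h1]
      by_cases h2 : k = (seq.length : Int)
      · rw [if_pos h2, h2, pvSplit_full seq (by intro hc; subst hc; simp at h2; omega)]
        congr 1
        rw [PySem.List.pyRange_one, List.map_map, ← pvSingletons seq]
        have hlen : ((seq.length : Int) - 0).toNat = seq.length := by omega
        rw [hlen]
        refine List.map_congr_left ?_
        intro t _
        simp only [Function.comp, zero_add]
        have hc : (t : Int) + 1 = ((t + 1 : Nat) : Int) := by push_cast; ring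
        rw [hc, PySem.List.slice_natCast]
        congr 1
        omega
      · rw [if_neg h2]
        have hn1 : PySem.List.pyRange 1 (seq.length : Int) 1 =
            (List.range' 1 (seq.length - 1)).map Int.ofNat := by
          rw [PySem.List.pyRange_one, List.range'_eq_map_range, List.map_map]
          have hlen : ((seq.length : Int) - 1).toNat = seq.length - 1 := by omega
          rw [hlen]
          refine List.map_congr_left ?_
          intro t _
          simp only [Function.comp, Int.ofNat_eq_natCast]
          push_cast
          ring
        rw [hn1, pvCombos_map_ofNat]
        rw [PySem.List.foldl_append_singleton_eq_map]
        rw [List.map_map, List.nil_append]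
        have hstep : ∀ cuts ∈ pvCombosN (k - 1).toNat (List.range' 1 (seq.length - 1)),
            ((fun split_positions =>
              (let st := split_positions.foldl
                (fun (st : List (List Int) × Int) pos =>
                  (st.1 ++ [PySem.List.slice seq (some st.2) (some pos)], pos)) ([], 0)
               st.1 ++ [PySem.List.slice seq (some st.2) none])) ∘ List.map Int.ofNat) cuts =
            pvG seq 0 cuts := by
          intro cuts _
          simpa using pvG_foldl seq cuts [] 0
        rw [List.map_congr_left hstep]
        have hm := pvMain seq ((k - 1).toNat) 0 (by omega)
        simp only [Nat.zero_add, Nat.sub_zero, List.drop_zero] at hm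
        have hcast : (((k - 1).toNat + 1 : Nat) : Int) = k := by omega
        rw [hcast] at hm
        exact hm
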